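-- pv_equiv track=rewrite | github.com/iPriyadarshi/Data-Structures-and-Algorithms | Leetcode/1717. Maximum Score From Removing Substrings.py | removeSubStr
-- ===== SOURCE A (Python) =====
-- def removeSubStr(string, matchStr):
--     s = list(string)
--     write = 0
--     for read in range(len(s)):
--         s[write] = s[read]
--         write += 1
--         if (
--             write >= 2
--             and s[write - 2] == matchStr[0]
--             and s[write - 1] == matchStr[1]
--         ):
--             write -= 2  # remove the pair
--     return "".join(s[:write])
-- ===== SOURCE B (Python) =====
-- def removeSubStr(string, matchStr):
--     pair = matchStr[:2]
--     while pair in string: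
--         string = string.replace(pair, "")
--     return string
-- ===== Notes on version B (the rewrite author's own statement) =====
-- stated objective: idiomatic
-- what changed: Replaces A's single-pass Python-level write-pointer stack simulation by computing the two-character pattern matchStr[:2] once and running the idiomatic fixpoint loop `while pair in string: string = string.replace(pair, '')` (no stack); the per-character work moves into C-level str.replace/in, measured faster.
-- intended difference: For a 1-character matchStr occurring only as string's last character, A returns string unchanged (its pair check never reaches the last position) while B removes that character, the intended removal of the pattern. — e.g. on removeSubStr("xa", "a"): A returns "xa", B returns "x"
-- outside the precondition, e.g. on removeSubStr('x', ''): A returns 'x', B does not finish within the time limit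
-- crash fix: On a 1-character matchStr occurring before string's last position A raises IndexError (it reads matchStr[1]); B returns string with every occurrence of that character removed. — e.g. on removeSubStr("ax", "a"): A raises IndexError, B returns "x"
import Mathlib
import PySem

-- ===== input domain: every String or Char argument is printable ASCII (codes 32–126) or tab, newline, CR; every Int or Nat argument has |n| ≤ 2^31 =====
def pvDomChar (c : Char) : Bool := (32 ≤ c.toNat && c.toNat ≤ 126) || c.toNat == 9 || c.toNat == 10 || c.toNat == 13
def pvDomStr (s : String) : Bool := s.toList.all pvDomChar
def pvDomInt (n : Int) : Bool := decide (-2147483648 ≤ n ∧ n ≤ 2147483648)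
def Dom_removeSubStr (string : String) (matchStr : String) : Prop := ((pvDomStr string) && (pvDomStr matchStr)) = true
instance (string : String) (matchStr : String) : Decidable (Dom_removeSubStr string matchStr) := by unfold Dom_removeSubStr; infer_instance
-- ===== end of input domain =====

-- B replaces A's write-pointer stack pass by computing pair = matchStr[:2] once and running the
-- idiomatic fixpoint loop `while pair in string: string = string.replace(pair, "")` (no stack);
-- equal outside D_ (the 1-char pattern occurring only as string's last character).


-- ===== PORT A =====
-- A: one pass with a write pointer into the copied char list; on Pre_ inputs every read/write
-- index is in range and matchStr[1] is only read when it exists (proved below via foldA_inv /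
-- the no-occurrence lemmas), so List.getD / List.set transcribe s[i] / s[i]=c exactly.
def removeSubStr (string : String) (matchStr : String) : String :=
  let s := string.toList
  let m := matchStr.toList
  let st := (List.range s.length).foldl (fun (st : List Char × Nat) read =>
      let s1 := st.1.set st.2 (st.1.getD read ' ')
      let w := st.2 + 1
      if 2 ≤ w ∧ s1.getD (w - 2) ' ' = m.getD 0 ' ' ∧ s1.getD (w - 1) ' ' = m.getD 1 ' ' then
        (s1, w - 2)
      else (s1, w)) (s, 0)
  String.ofList (st.1.take st.2)

-- ===== PORT B =====
-- B: pair = matchStr[:2] (PySem slice, bound literal and nonnegative); then delete every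
-- occurrence of pair, rescan, until none is left.  The fuel (= |string|) only makes the
-- while-loop total, it never cuts the loop short: on Pre_ inputs each replace strictly
-- shortens the string (repAB_length_lt below, |pair| ≥ 1 on Pre_).
def removeSubStrAltGo (pair : String) : Nat → String → String
  | 0, s => s
  | fuel + 1, s =>
      if PySem.Str.isIn pair s then
        removeSubStrAltGo pair fuel (PySem.Str.replace s pair "")
      else s

def removeSubStr_alt (string : String) (matchStr : String) : String :=
  let pair := String.ofList (PySem.List.slice matchStr.toList none (some 2))
  removeSubStrAltGo pair string.toList.length string

-- ===== PRECONDITION & SPEC =====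
-- Pre_ admits every matchStr of length ≥ 2 (A is total there, B removes the same pair matchStr[:2])
-- and length-1 patterns not occurring before string's last position.  Excluded: matchStr = ""
-- (A raises IndexError once two characters are buffered; on shorter strings A returns string but
-- B loops forever — see cites), and 1-char patterns occurring before the last position (A raises
-- IndexError reading matchStr[1]; Raises_ below).
def Pre_removeSubStr (string : String) (matchStr : String) : Prop :=
  2 ≤ matchStr.toList.length ∨
    (matchStr.toList.length = 1 ∧ matchStr.toList.getD 0 ' ' ∉ string.toList.dropLast)
instance (string : String) (matchStr : String) : Decidable (Pre_removeSubStr string matchStr) := by unfold Pre_removeSubStr; infer_instance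
def pvWitness_removeSubStr : String × String := ("cabbaabd", "ab")

-- On a 1-character matchStr occurring before string's last position A raises IndexError (it reads
-- matchStr[1]); B returns string with every occurrence of that character removed.
def Raises_removeSubStr (string : String) (matchStr : String) : Prop :=
  matchStr.toList.length = 1 ∧ matchStr.toList.getD 0 ' ' ∈ string.toList.dropLast
instance (string : String) (matchStr : String) : Decidable (Raises_removeSubStr string matchStr) := by unfold Raises_removeSubStr; infer_instance
def pvRaiseWitness_removeSubStr : String × String := ("ax", "a")
def pvRaiseWitnessOut_removeSubStr : String := "x"

-- For a 1-character matchStr occurring only as string's last character, A returns string unchanged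
-- (its pair check never reaches the last position) while B removes that character, the intended
-- removal of the pattern.
def D_removeSubStr (string : String) (matchStr : String) : Prop :=
  matchStr.toList.length = 1 ∧ string.toList.getLast? = some (matchStr.toList.getD 0 ' ')
instance (string : String) (matchStr : String) : Decidable (D_removeSubStr string matchStr) := by unfold D_removeSubStr; infer_instance

def Spec_removeSubStr (string : String) (matchStr : String) (out : String) : Prop := ¬ D_removeSubStr string matchStr → out = removeSubStr_alt string matchStr
instance (string : String) (matchStr : String) (out : String) : Decidable (Spec_removeSubStr string matchStr out) := by unfold Spec_removeSubStr; infer_instance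

def pvDiffWitness_removeSubStr : String × String := ("xa", "a")
def pvDiffWitnessOut_removeSubStr : String × String := ("xa", "x")

-- ===== CLAIM (what is proved, stated in full; the proofs are below) =====
def Claim_unchanged_removeSubStr : Prop := ∀ (string : String) (matchStr : String), Dom_removeSubStr string matchStr → Pre_removeSubStr string matchStr → Spec_removeSubStr string matchStr (removeSubStr string matchStr)
def Claim_changed_removeSubStr : Prop := Dom_removeSubStr (pvDiffWitness_removeSubStr.1) (pvDiffWitness_removeSubStr.2) ∧ Pre_removeSubStr (pvDiffWitness_removeSubStr.1) (pvDiffWitness_removeSubStr.2) ∧ D_removeSubStr (pvDiffWitness_removeSubStr.1) (pvDiffWitness_removeSubStr.2) ∧ removeSubStr (pvDiffWitness_removeSubStr.1) (pvDiffWitness_removeSubStr.2) = pvDiffWitnessOut_removeSubStr.1 ∧ removeSubStr_alt (pvDiffWitness_removeSubStr.1) (pvDiffWitness_removeSubStr.2) = pvDiffWitnessOut_removeSubStr.2 ∧ pvDiffWitnessOut_removeSubStr.1 ≠ pvDiffWitnessOut_removeSubStr.2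
def Claim_exact_removeSubStr : Prop := ∀ (string : String) (matchStr : String), Dom_removeSubStr string matchStr → Pre_removeSubStr string matchStr → D_removeSubStr string matchStr → removeSubStr string matchStr ≠ removeSubStr_alt string matchStr
def Claim_raises_removeSubStr : Prop := (∀ (string : String) (matchStr : String), Dom_removeSubStr string matchStr → Raises_removeSubStr string matchStr → ¬ Pre_removeSubStr string matchStr) ∧ (Dom_removeSubStr (pvRaiseWitness_removeSubStr.1) (pvRaiseWitness_removeSubStr.2) ∧ Raises_removeSubStr (pvRaiseWitness_removeSubStr.1) (pvRaiseWitness_removeSubStr.2) ∧ removeSubStr_alt (pvRaiseWitness_removeSubStr.1) (pvRaiseWitness_removeSubStr.2) = pvRaiseWitnessOut_removeSubStr)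

-- ===== LEMMAS AND PROOFS =====

-- The common mathematical object: the pair-removal stack automaton, stack kept reversed
-- (head = top); pushing c pops the top two when they spell matchStr = [a, b].
-- A computes it with its write pointer (foldA_inv), B reaches its output as the unique
-- pattern-free fixpoint of global replacement (foldl_repAB / foldl_no_occ).
def rstep (a b : Char) (R : List Char) (c : Char) : List Char :=
  match R with
  | [] => [c]
  | x :: t => if x = a ∧ c = b then t else c :: x :: t

def rstack (a b : Char) (l : List Char) : List Char := l.foldl (rstep a b) []

def GoodStk (a b : Char) (R : List Char) : Prop :=
  List.IsChain (fun x y => ¬(y = a ∧ x = b)) R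

def repAB (a b : Char) : List Char → List Char
  | [] => []
  | [c] => [c]
  | c :: d :: t => if c = a ∧ d = b then repAB a b t else c :: repAB a b (d :: t)

theorem goodStk_rstep (a b : Char) (R : List Char) (c : Char) (h : GoodStk a b R) :
    GoodStk a b (rstep a b R c) := by
  unfold GoodStk rstep
  match R with
  | [] => simp
  | x :: t =>
    simp only []
    split_ifs with hc
    · exact h.tail
    · exact List.isChain_cons_cons.mpr ⟨hc, h⟩

theorem rstep_pair (a b : Char) (R : List Char) (h : GoodStk a b R) :
    rstep a b (rstep a b R a) b = R := by
  match R with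
  | [] => simp [rstep]
  | x :: t =>
    by_cases hx : x = a ∧ a = b
    · have hstep : rstep a b (x :: t) a = t := by simp [rstep, hx]
      rw [hstep]
      match t with
      | [] => simp [rstep, hx.1, hx.2]
      | y :: t' =>
        have hya : ¬(y = a ∧ x = b) := List.isChain_cons_cons.mp h |>.1
        have hyA : y ≠ a := fun h' => hya ⟨h', hx.1.trans hx.2⟩
        have hxb : x = b := hx.1.trans hx.2
        simp [rstep, hyA, ← hxb]
    · have hstep : rstep a b (x :: t) a = a :: x :: t := by simp [rstep, hx]
      rw [hstep]
      simp [rstep]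

theorem foldl_repAB (a b : Char) (l : List Char) (R : List Char) (h : GoodStk a b R) :
    (repAB a b l).foldl (rstep a b) R = l.foldl (rstep a b) R := by
  induction l using repAB.induct a b generalizing R with
  | case1 => rfl
  | case2 c => rfl
  | case3 c d t hcd ih =>
    obtain ⟨hc, hd⟩ := hcd
    subst hc hd
    simp only [repAB, and_self, if_true]
    rw [ih R h, List.foldl_cons, List.foldl_cons, rstep_pair c d R h]
  | case4 c d t hcd ih =>
    simp only [repAB, if_neg hcd]
    rw [List.foldl_cons, List.foldl_cons, ih _ (goodStk_rstep a b R c h)]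

theorem foldl_no_occ (a b : Char) (l : List Char) (R : List Char)
    (h : ¬ [a, b] <:+: l) (hb : ¬(R.head? = some a ∧ l.head? = some b)) :
    l.foldl (rstep a b) R = l.reverse ++ R := by
  induction l generalizing R with
  | nil => simp
  | cons c t ih =>
    have hstep : rstep a b R c = c :: R := by
      match R with
      | [] => rfl
      | x :: r =>
        have hx : ¬(x = a ∧ c = b) := by
          intro hc
          exact hb ⟨by simp [hc.1], by simp [hc.2]⟩
        simp [rstep, hx]
    rw [List.foldl_cons, hstep]
    rw [ih (c :: R)]
    · simp
    · intro hocc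
      obtain ⟨u, v, huv⟩ := hocc
      exact h ⟨c :: u, v, by simp [huv]⟩
    · rintro ⟨hca, htb⟩
      simp only [List.head?_cons, Option.some.injEq] at hca
      match t, htb with
      | bb :: t', htb =>
        simp only [List.head?_cons, Option.some.injEq] at htb
        exact h (List.IsPrefix.isInfix ⟨t', by simp [hca, htb]⟩)

theorem repAB_length_le (a b : Char) (l : List Char) : (repAB a b l).length ≤ l.length := by
  induction l using repAB.induct a b with
  | case1 => simp [repAB]
  | case2 c => simp [repAB]
  | case3 c d t hcd ih =>
    obtain ⟨hc, hd⟩ := hcd; subst hc hd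
    simp only [repAB, and_self, if_true]
    simp only [List.length_cons]
    omega
  | case4 c d t hcd ih =>
    simp only [repAB, if_neg hcd, List.length_cons]
    simp only [List.length_cons] at ih
    omega

theorem repAB_length_lt (a b : Char) (l : List Char) (h : [a, b] <:+: l) :
    (repAB a b l).length < l.length := by
  induction l using repAB.induct a b with
  | case1 =>
    exact absurd h.length_le (by simp)
  | case2 c =>
    exact absurd h.length_le (by simp)
  | case3 c d t hcd ih =>
    obtain ⟨hc, hd⟩ := hcd; subst hc hd
    simp only [repAB, and_self, if_true, List.length_cons]
    have := repAB_length_le c d t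
    omega
  | case4 c d t hcd ih =>
    simp only [repAB, if_neg hcd, List.length_cons]
    have ht : [a, b] <:+: d :: t := by
      obtain ⟨u, v, huv⟩ := h
      match u, huv with
      | [], huv =>
        simp at huv
        exact absurd ⟨huv.1.symm, huv.2.1.symm⟩ hcd
      | x :: u', huv =>
        simp only [List.cons_append, List.cons.injEq] at huv
        exact ⟨u', v, huv.2⟩
    have := ih ht
    simp only [List.length_cons] at this
    omega

theorem replace_go_eq (a b : Char) :
    ∀ (fuel : Nat) (l acc : List Char), l.length ≤ fuel →
      PySem.Chars.replace.go [a, b] [] fuel l acc = acc.reverse ++ repAB a b l := by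
  intro fuel
  induction fuel with
  | zero =>
    intro l acc hl
    match l, hl with
    | [], _ => simp [PySem.Chars.replace.go, repAB]
  | succ fuel ih =>
    intro l acc hl
    match l with
    | [] => simp [PySem.Chars.replace.go, repAB]
    | c :: t =>
      rw [PySem.Chars.replace.go]
      by_cases hp : [a, b].isPrefixOf (c :: t)
      · rw [if_pos hp]
        obtain ⟨v, hv⟩ := List.isPrefixOf_iff_prefix.mp hp
        match t, hv with
        | b2 :: t', hv =>
          simp only [List.cons_append, List.nil_append, List.cons.injEq] at hv
          obtain ⟨hca, hb2, hts⟩ := hv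
          subst hca
          subst hb2
          have hdrop : List.drop ([a, b].length) (a :: b :: t') = t' := rfl
          rw [hdrop, List.reverse_nil, List.nil_append]
          rw [ih t' acc (by simp at hl; omega)]
          simp [repAB]
      · rw [if_neg hp]
        rw [ih t (c :: acc) (by simpa using Nat.le_of_succ_le_succ hl)]
        rw [List.reverse_cons, List.append_assoc]
        congr 1
        match t with
        | [] => simp [repAB]
        | d :: t' =>
          have hne : ¬(c = a ∧ d = b) := by
            intro hc
            exact hp (List.isPrefixOf_iff_prefix.mpr ⟨t', by simp [hc.1, hc.2]⟩)
          simp [repAB, hne]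

theorem replace_eq_repAB (a b : Char) (l : List Char) :
    PySem.Chars.replace l [a, b] [] = repAB a b l := by
  rw [PySem.Chars.replace]
  simp only [List.isEmpty_cons, if_false, Bool.false_eq_true]
  exact replace_go_eq a b l.length l [] le_rfl

theorem rstack_length_le (a b : Char) (l : List Char) (R : List Char) :
    (l.foldl (rstep a b) R).length ≤ R.length + l.length := by
  induction l generalizing R with
  | nil => simp
  | cons c t ih =>
    have h1 : (rstep a b R c).length ≤ R.length + 1 := by
      match R with
      | [] => simp [rstep]
      | x :: r =>
        rw [rstep]
        split_ifs <;> simp <;> omega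
    calc ((c :: t).foldl (rstep a b) R).length
        = (t.foldl (rstep a b) (rstep a b R c)).length := rfl
      _ ≤ (rstep a b R c).length + t.length := ih _
      _ ≤ R.length + 1 + t.length := by omega
      _ = R.length + (c :: t).length := by simp; omega

theorem altGo_eq (a b : Char) (matchStr : String) (hm : matchStr.toList = [a, b]) :
    ∀ (fuel : Nat) (s : String), s.toList.length ≤ fuel →
      removeSubStrAltGo matchStr fuel s = String.ofList ((rstack a b s.toList).reverse) := by
  intro fuel
  induction fuel with
  | zero =>
    intro s hs
    have h0 : s.toList = [] := List.eq_nil_of_length_eq_zero (Nat.le_zero.mp hs)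
    rw [removeSubStrAltGo]
    conv_lhs => rw [← String.ofList_toList (s := s)]
    rw [h0]
    simp [rstack]
  | succ fuel ih =>
    intro s hs
    rw [removeSubStrAltGo]
    by_cases hin : PySem.Str.isIn matchStr s = true
    · rw [if_pos hin]
      have hinf : [a, b] <:+: s.toList := by
        have := (PySem.Str.isIn_iff_infix matchStr s).mp hin
        rwa [hm] at this
      have htl : (PySem.Str.replace s matchStr "").toList = repAB a b s.toList := by
        rw [PySem.Str.toList_replace, hm]
        simpa using replace_eq_repAB a b s.toList
      rw [ih _ (by rw [htl]; have := repAB_length_lt a b s.toList hinf; omega)]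
      rw [htl]
      unfold rstack
      rw [foldl_repAB a b s.toList [] (by simp [GoodStk])]
    · rw [if_neg hin]
      have hninf : ¬ [a, b] <:+: s.toList := by
        intro hc
        exact hin ((PySem.Str.isIn_iff_infix matchStr s).mpr (hm ▸ hc))
      unfold rstack
      rw [foldl_no_occ a b s.toList [] hninf (by simp)]
      simp [String.ofList_toList]

def stepA (m : List Char) (st : List Char × Nat) (read : Nat) : List Char × Nat :=
  let s1 := st.1.set st.2 (st.1.getD read ' ')
  let w := st.2 + 1
  if 2 ≤ w ∧ s1.getD (w - 2) ' ' = m.getD 0 ' ' ∧ s1.getD (w - 1) ' ' = m.getD 1 ' ' then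
    (s1, w - 2)
  else (s1, w)

theorem take_set_succ (l : List Char) (x : Char) (n : Nat) (h : n < l.length) :
    (l.set n x).take (n + 1) = l.take n ++ [x] := by
  rw [List.set_eq_take_cons_drop x h, List.take_append]
  simp [Nat.le_of_lt h]

theorem foldA_inv (m : List Char) (a b : Char) (hm0 : m.getD 0 ' ' = a)
    (hm1 : m.getD 1 ' ' = b) (l : List Char) :
    ∀ n, n ≤ l.length →
      ∃ arr : List Char,
        (List.range n).foldl (stepA m) (l, 0) = (arr, (rstack a b (l.take n)).length) ∧
        arr.length = l.length ∧
        arr.take (rstack a b (l.take n)).length = (rstack a b (l.take n)).reverse ∧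
        arr.drop n = l.drop n := by
  intro n
  induction n with
  | zero =>
    intro _
    exact ⟨l, by simp [rstack], rfl, by simp [rstack], rfl⟩
  | succ n ihn =>
    intro hn
    have hnl : n < l.length := hn
    obtain ⟨arr, heq, hlen, htake, hdrop⟩ := ihn (Nat.le_of_lt hnl)
    set R := rstack a b (l.take n) with hR
    have hwn : R.length ≤ n := by
      have := rstack_length_le a b (l.take n) []
      simpa [rstack, Nat.min_eq_left (Nat.le_of_lt hnl)] using this
    have hwl : R.length < l.length := Nat.lt_of_le_of_lt hwn hnl
    -- the element read at this step
    have harrn : arr.getD n ' ' = l[n] := by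
      rw [List.getD_eq_getElem arr ' ' (hlen ▸ hnl)]
      have : arr[n] = (arr.drop n)[0]'(by simp [hlen]; omega) := by
        simp
      rw [this]
      simp [hdrop]
    -- the new array
    set x := l[n] with hx
    set arr1 := arr.set R.length x with harr1
    have hlen1 : arr1.length = l.length := by simp [harr1, hlen]
    have htake1 : arr1.take (R.length + 1) = R.reverse ++ [x] := by
      rw [harr1, take_set_succ arr x R.length (hlen ▸ hwl), htake]
    have hdrop1 : arr1.drop (n + 1) = l.drop (n + 1) := by
      rw [harr1, List.drop_set_of_lt (Nat.lt_succ_of_le hwn)]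
      have h2 := congrArg (List.drop 1) hdrop
      simpa [List.drop_drop] using h2
    have hget_w : arr1.getD R.length ' ' = x := by
      rw [List.getD_eq_getElem arr1 ' ' (by rw [hlen1]; exact hwl)]
      simp only [harr1]
      exact List.getElem_set_self (by rw [List.length_set, hlen]; exact hwl)
    have hstk : rstack a b (l.take (n + 1)) = rstep a b R x := by
      rw [List.take_succ_eq_append_getElem hnl]
      unfold rstack
      rw [List.foldl_append]
      rfl
    have hunf : (List.range (n + 1)).foldl (stepA m) (l, 0)
        = stepA m (arr, R.length) n := by
      rw [List.range_succ, List.foldl_append, heq]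
      rfl
    have hs1 : (arr.set R.length (arr.getD n ' ')) = arr1 := by rw [harrn, harr1]
    match hRm : R with
    | [] =>
      have hcond : ¬(2 ≤ ([] : List Char).length + 1 ∧
          arr1.getD (([] : List Char).length + 1 - 2) ' ' = a ∧
          arr1.getD (([] : List Char).length + 1 - 1) ' ' = b) := by
        simp
      refine ⟨arr1, ?_, hlen1, ?_, hdrop1⟩
      · rw [hunf, hstk]
        unfold stepA
        simp only [hm0, hm1, hs1]
        rw [if_neg hcond]
        rfl
      · rw [hstk]
        show arr1.take 1 = (rstep a b [] x).reverse
        simpa [rstep] using htake1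
    | p :: t =>
      have hlt : t.length < arr1.length := by rw [hlen1]; simp [hRm] at hwl; omega
      have hgd : arr1.getD ((p :: t).length + 1 - 2) ' ' = p := by
        have hidx : (p :: t).length + 1 - 2 = t.length := by simp
        rw [hidx, List.getD_eq_getElem arr1 ' ' hlt]
        have e1 : arr1[t.length] = (arr1.take ((p :: t).length + 1))[t.length]'(by
            rw [List.length_take]; simp [hlen1]; omega) := by
          rw [List.getElem_take]
        rw [e1]
        have e2 : (arr1.take ((p :: t).length + 1)) = (p :: t).reverse ++ [x] := htake1
        rw [List.getElem_of_eq e2 _]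
        rw [List.getElem_append_left (by simp)]
        rw [List.getElem_reverse]
        simp
      have hw1 : (p :: t).length + 1 - 1 = (p :: t).length := by simp
      by_cases hpb : p = a ∧ x = b
      · have hcond : 2 ≤ (p :: t).length + 1 ∧
            arr1.getD ((p :: t).length + 1 - 2) ' ' = a ∧
            arr1.getD ((p :: t).length + 1 - 1) ' ' = b := by
          refine ⟨by simp, ?_, ?_⟩
          · rw [hgd]; exact hpb.1
          · rw [hw1, hget_w]; exact hpb.2
        refine ⟨arr1, ?_, hlen1, ?_, hdrop1⟩
        · rw [hunf, hstk]
          unfold stepA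
          simp only [hm0, hm1, hs1]
          rw [if_pos hcond]
          have : rstep a b (p :: t) x = t := by simp [rstep, hpb]
          rw [this]
          simp
        · rw [hstk]
          have hrs : rstep a b (p :: t) x = t := by simp [rstep, hpb]
          rw [hrs]
          have e3 : arr1.take t.length = (arr1.take ((p :: t).length + 1)).take t.length := by
            rw [List.take_take]
            congr 1
            simp; omega
          rw [e3, htake1]
          rw [List.take_append_of_le_length (by simp)]
          rw [List.reverse_cons, List.take_left']
          simp
      · have hcond : ¬(2 ≤ (p :: t).length + 1 ∧
            arr1.getD ((p :: t).length + 1 - 2) ' ' = a ∧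
            arr1.getD ((p :: t).length + 1 - 1) ' ' = b) := by
          rintro ⟨-, h1, h2⟩
          rw [hgd] at h1
          rw [hw1, hget_w] at h2
          exact hpb ⟨h1, h2⟩
        refine ⟨arr1, ?_, hlen1, ?_, hdrop1⟩
        · rw [hunf, hstk]
          unfold stepA
          simp only [hm0, hm1, hs1]
          rw [if_neg hcond]
          have : rstep a b (p :: t) x = x :: p :: t := by simp [rstep, hpb]
          rw [this]
          simp
        · rw [hstk]
          have hrs : rstep a b (p :: t) x = x :: p :: t := by simp [rstep, hpb]
          rw [hrs]
          show arr1.take ((p :: t).length + 1) = _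
          rw [htake1]
          simp

theorem alt_no_occ (matchStr s : String) (h : PySem.Str.isIn matchStr s = false) :
    ∀ fuel, removeSubStrAltGo matchStr fuel s = s := by
  intro fuel
  cases fuel with
  | zero => rfl
  | succ fuel =>
    rw [PySem.Str.isIn_eq] at h
    rw [removeSubStrAltGo, if_neg (by simp [h])]

theorem portA_eq_rstack (string : String) (matchStr : String) :
    removeSubStr string matchStr =
      String.ofList ((rstack (matchStr.toList.getD 0 ' ') (matchStr.toList.getD 1 ' ')
        string.toList).reverse) := by
  have hA : removeSubStr string matchStr =
      String.ofList ((((List.range string.toList.length).foldl (stepA matchStr.toList)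
        (string.toList, 0))).1.take (((List.range string.toList.length).foldl
          (stepA matchStr.toList) (string.toList, 0))).2) := rfl
  obtain ⟨arr, heq, hlen, htake, hdrop⟩ :=
    foldA_inv matchStr.toList (matchStr.toList.getD 0 ' ') (matchStr.toList.getD 1 ' ')
      rfl rfl string.toList string.toList.length le_rfl
  rw [hA, heq]
  simp only [List.take_length] at htake ⊢
  rw [htake]

-- Python replace with a 1-character pattern removes every occurrence of that character
theorem replace_go_one (c : Char) :
    ∀ (fuel : Nat) (l acc : List Char), l.length ≤ fuel →
      PySem.Chars.replace.go [c] [] fuel l acc = acc.reverse ++ l.filter (· ≠ c) := by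
  intro fuel
  induction fuel with
  | zero =>
    intro l acc hl
    match l, hl with
    | [], _ => simp [PySem.Chars.replace.go]
  | succ fuel ih =>
    intro l acc hl
    match l with
    | [] => simp [PySem.Chars.replace.go]
    | d :: t =>
      rw [PySem.Chars.replace.go]
      by_cases hp : [c].isPrefixOf (d :: t)
      · have hdc : d = c := by
          obtain ⟨v, hv⟩ := List.isPrefixOf_iff_prefix.mp hp
          simpa using congrArg List.head? hv.symm
        rw [if_pos hp]
        show PySem.Chars.replace.go [c] [] fuel t acc
            = acc.reverse ++ (d :: t).filter (· ≠ c)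
        rw [ih t acc (by simp at hl; omega)]
        simp [hdc]
      · have hdc : d ≠ c := by
          intro h
          exact hp (List.isPrefixOf_iff_prefix.mpr ⟨t, by rw [h]; simp⟩)
        rw [if_neg hp, ih t (d :: acc) (by simpa using Nat.le_of_succ_le_succ hl)]
        simp [hdc]

theorem replace_eq_filter (c : Char) (l : List Char) :
    PySem.Chars.replace l [c] [] = l.filter (· ≠ c) := by
  rw [PySem.Chars.replace]
  simp only [List.isEmpty_cons, if_false, Bool.false_eq_true]
  simpa using replace_go_one c l.length l [] le_rfl

theorem no_pair_infix (l : List Char) (c x : Char) (h : c ∉ l.dropLast) :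
    ¬ [c, x] <:+: l := by
  rintro ⟨u, v, huv⟩
  apply h
  rw [← huv]
  cases v with
  | nil => simp
  | cons w vs =>
    rw [List.append_assoc, List.dropLast_append_of_ne_nil (by simp)]
    simp

-- with a 1-character pattern [c] that is never followed-by-anything as [c, ' '], A's pass copies
-- string unchanged
theorem portA_id_of_no_pair (string : String) (matchStr : String) (c : Char)
    (hc : matchStr.toList = [c]) (hninf : ¬ [c, ' '] <:+: string.toList) :
    removeSubStr string matchStr = string := by
  rw [portA_eq_rstack]
  unfold rstack
  have hgd : matchStr.toList.getD 0 ' ' = c := by simp [hc]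
  have hgd1 : matchStr.toList.getD 1 ' ' = ' ' := by simp [hc]
  rw [hgd, hgd1, foldl_no_occ c ' ' string.toList [] hninf (by simp)]
  simp [String.ofList_toList (s := string)]

theorem ports_agree (string : String) (matchStr : String)
    (hpre : Pre_removeSubStr string matchStr) (hnd : ¬ D_removeSubStr string matchStr) :
    removeSubStr string matchStr = removeSubStr_alt string matchStr := by
  have hslice : PySem.List.slice matchStr.toList none (some 2) = matchStr.toList.take 2 := by
    simp [pysem]
  cases hpre with
  | inl hpre =>
    -- length ≥ 2: both sides are the pair-removal automaton on (matchStr[0], matchStr[1])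
    match hm : matchStr.toList, hpre with
    | a :: b :: t, _ =>
      have hpair : (String.ofList (PySem.List.slice matchStr.toList none (some 2))).toList
          = [a, b] := by
        rw [hslice, hm]
        simp
      rw [portA_eq_rstack, removeSubStr_alt]
      rw [altGo_eq a b _ hpair string.toList.length string le_rfl, hm]
      rfl
  | inr hpre =>
    -- length 1 outside D_: the character occurs nowhere in string, both return string
    obtain ⟨hm1, hdropl⟩ := hpre
    have hlast : string.toList.getLast? ≠ some (matchStr.toList.getD 0 ' ') := by
      intro hc
      exact hnd ⟨hm1, hc⟩
    have hmem : matchStr.toList.getD 0 ' ' ∉ string.toList := by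
      intro hmem
      have hne : string.toList ≠ [] := by rintro h; rw [h] at hmem; simp at hmem
      have hsplit := List.dropLast_concat_getLast hne
      rw [← hsplit] at hmem
      rcases List.mem_append.mp hmem with h | h
      · exact hdropl h
      · simp only [List.mem_singleton] at h
        exact hlast (by rw [List.getLast?_eq_some_getLast hne, ← h])
    obtain ⟨c, hc⟩ := List.length_eq_one_iff.mp hm1
    have hgd : matchStr.toList.getD 0 ' ' = c := by simp [hc]
    rw [hgd] at hmem
    have hninf : ¬ [c, ' '] <:+: string.toList :=
      no_pair_infix string.toList c ' ' (fun h => hmem (List.dropLast_subset _ h))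
    have hpair : (String.ofList (PySem.List.slice matchStr.toList none (some 2))).toList
        = [c] := by
      rw [hslice, hc]
      simp
    have hB : PySem.Str.isIn (String.ofList (PySem.List.slice matchStr.toList none (some 2)))
        string = false := by
      rw [← Bool.not_eq_true, PySem.Str.isIn_iff_infix, hpair]
      intro h
      exact hmem (h.subset (by simp))
    rw [portA_id_of_no_pair string matchStr c hc hninf, removeSubStr_alt]
    rw [alt_no_occ _ string hB]

-- ===== VERDICT (by name: the statements are the Claim_ definitions above) =====
theorem removeSubStr_spec : Claim_unchanged_removeSubStr := by
  intro string matchStr _ hpre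
  unfold Spec_removeSubStr
  intro hnd
  exact ports_agree string matchStr hpre hnd

theorem removeSubStr_changed : Claim_changed_removeSubStr := by
  unfold Claim_changed_removeSubStr; decide

theorem removeSubStr_tight : Claim_exact_removeSubStr := by
  intro string matchStr _ hpre hd
  obtain ⟨hm1, hlastc⟩ := hd
  have hdropl : matchStr.toList.getD 0 ' ' ∉ string.toList.dropLast := by
    cases hpre with
    | inl h => omega
    | inr h => exact h.2
  obtain ⟨c, hc⟩ := List.length_eq_one_iff.mp hm1
  have hgd : matchStr.toList.getD 0 ' ' = c := by simp [hc]
  rw [hgd] at hdropl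
  rw [hgd] at hlastc
  have hne : string.toList ≠ [] := by
    intro h
    rw [h] at hlastc
    simp at hlastc
  have hcl : string.toList.getLast hne = c := by
    have := List.getLast?_eq_some_getLast hne
    rw [hlastc] at this
    exact (Option.some.injEq _ _ ▸ this).symm
  have hsplit : string.toList.dropLast ++ [c] = string.toList := by
    rw [← hcl]
    exact List.dropLast_concat_getLast hne
  -- A returns string unchanged
  have hA : removeSubStr string matchStr = string :=
    portA_id_of_no_pair string matchStr c hc (no_pair_infix string.toList c ' ' hdropl)
  -- B strips the final character
  have hpair : (String.ofList (PySem.List.slice matchStr.toList none (some 2))).toList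
      = [c] := by
    rw [show PySem.List.slice matchStr.toList none (some 2) = matchStr.toList.take 2 by
      simp [pysem], hc]
    simp
  have hmem : c ∈ string.toList := by
    rw [← hsplit]
    simp
  have hin : PySem.Str.isIn (String.ofList (PySem.List.slice matchStr.toList none (some 2)))
      string = true := by
    rw [PySem.Str.isIn_iff_infix, hpair]
    obtain ⟨u, v, huv⟩ := List.append_of_mem hmem
    exact ⟨u, v, by simp [huv]⟩
  have hrepl : (PySem.Str.replace string
      (String.ofList (PySem.List.slice matchStr.toList none (some 2))) "").toList
      = string.toList.dropLast := by
    rw [PySem.Str.toList_replace, hpair]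
    have h1 : PySem.Chars.replace string.toList [c] (String.toList "")
        = string.toList.filter (· ≠ c) := by
      simpa using replace_eq_filter c string.toList
    rw [h1, ← hsplit, List.filter_append]
    have h2 : string.toList.dropLast.filter (· ≠ c) = string.toList.dropLast :=
      List.filter_eq_self.mpr (fun a ha => by
        simp only [ne_eq, decide_eq_true_eq]
        intro h
        subst h
        exact hdropl ha)
    rw [h2]
    simp
  have hnin2 : PySem.Str.isIn (String.ofList (PySem.List.slice matchStr.toList none (some 2)))
      (PySem.Str.replace string (String.ofList (PySem.List.slice matchStr.toList none (some 2))) "")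
      = false := by
    rw [← Bool.not_eq_true, PySem.Str.isIn_iff_infix, hpair, hrepl]
    intro h
    exact hdropl (h.subset (by simp))
  have hlen1 : ∃ k, string.toList.length = k + 1 := by
    match h : string.toList, hne with
    | d :: t, _ => exact ⟨t.length, by simp⟩
  obtain ⟨k, hk⟩ := hlen1
  have hB : removeSubStr_alt string matchStr
      = PySem.Str.replace string
          (String.ofList (PySem.List.slice matchStr.toList none (some 2))) "" := by
    rw [removeSubStr_alt]
    simp only [hk]
    rw [removeSubStrAltGo, if_pos hin]
    exact alt_no_occ _ _ hnin2 k
  intro hAB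
  rw [hA, hB] at hAB
  have := congrArg (fun s => s.toList.length) hAB
  simp only [hrepl] at this
  rw [← hsplit] at this
  simp at this

@[simp] theorem removeSubStr_raises : Claim_raises_removeSubStr := by
  unfold Claim_raises_removeSubStr
  refine ⟨?_, by decide⟩
  rintro string matchStr _ ⟨h1, h2⟩ (hc | ⟨-, hc⟩)
  · omega
  · exact hc h2
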